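-- pv_equiv track=rewrite | github.com/jhyang12345/algorithm-problems | problems/repetitive_coin_change.py | coin_change_repeat
-- ===== SOURCE A (Python) =====
-- def coin_change_repeat(coins, s):
--     cache = [0 for _ in range(s + 1)]
--     cache[0] = 1
--     for i in range(s):
--         for coin in coins:
--             if i + coin <= s:
--                 cache[i + coin] += cache[i]
--     return cache[s]
-- ===== SOURCE B (Python) =====
-- def coin_change_repeat(coins, s):
--     memo = {}
--
--     def ways(n):
--         if n == 0:
--             return 1
--         if n < 0:
--             return 0
--         if n in memo:
--             return memo[n]
--         total = 0
--         for c in coins: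
--             total += ways(n - c)
--         memo[n] = total
--         return total
--
--     return ways(s)
-- ===== Notes on version B (the rewrite author's own statement) =====
-- stated objective: alternative
-- what changed: Replaces A's forward-pushing bottom-up DP array with top-down memoized recursion on the remaining amount (composition recurrence ways(n) = sum of ways(n-c)).
-- outside the precondition, e.g. on coin_change_repeat([0], 1): A returns 0, B raises RecursionError; on coin_change_repeat([-1], 1): A returns 1, B raises RecursionError
import Mathlib
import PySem

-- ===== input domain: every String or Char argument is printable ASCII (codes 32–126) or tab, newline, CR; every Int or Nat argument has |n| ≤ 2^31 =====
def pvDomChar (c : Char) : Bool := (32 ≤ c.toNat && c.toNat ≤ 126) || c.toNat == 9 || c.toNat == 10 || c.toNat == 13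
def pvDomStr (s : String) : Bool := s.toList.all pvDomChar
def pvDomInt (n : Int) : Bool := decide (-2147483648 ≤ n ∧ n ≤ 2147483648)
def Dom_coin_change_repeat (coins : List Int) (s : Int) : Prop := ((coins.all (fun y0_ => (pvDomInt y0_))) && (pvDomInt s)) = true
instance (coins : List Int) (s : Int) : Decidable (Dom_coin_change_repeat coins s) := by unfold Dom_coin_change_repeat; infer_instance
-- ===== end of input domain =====

-- B replaces A's forward-pushing bottom-up DP array with top-down memoized recursion on the
-- remaining amount (objective: alternative decomposition, same asymptotic cost).

-- ===== PORT A =====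
-- literal transliteration of A; pySetD/pyGetD are the total forms of Python's cache[...]
-- (exact wherever Python does not raise IndexError; inside Pre_ no raise occurs)
def coin_change_repeat (coins : List Int) (s : Int) : Int :=
  let cache := (PySem.List.pyRange 0 (s + 1) 1).map (fun _ => (0 : Int))
  let cache := PySem.List.pySetD cache 0 1
  let cache := (PySem.List.pyRange 0 s 1).foldl (fun cache i =>
      coins.foldl (fun cache coin =>
        if i + coin ≤ s then
          PySem.List.pySetD cache (i + coin)
            (PySem.List.pyGetD cache (i + coin) 0 + PySem.List.pyGetD cache i 0)
        else cache) cache) cache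
  PySem.List.pyGetD cache s 0

-- ===== PORT B =====
-- B's ways(n) with its memo dict threaded as explicit state (Python's closed-over mutable dict).
-- The callee's `n == 0` / `n < 0` checks are performed where the argument is formed, so that n
-- stays a Nat; the `1 ≤ c` guard only makes the recursion total in Lean: on a coin c ≤ 0
-- Python B's recursion never terminates (RecursionError), which is outside Pre_.
def waysM (coins : List Int) (n : Nat) (memo : PySem.Dict Int Int) :
    Int × PySem.Dict Int Int :=
  if _hn : n = 0 then (1, memo)
  else
    match memo.get? (n : Int) with
    | some v => (v, memo)
    | none =>
      let p := coins.foldl (fun (acc : Int × PySem.Dict Int Int) c =>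
          if _h2 : (n : Int) - c < 0 then (acc.1 + 0, acc.2)
          else if _h3 : 1 ≤ c then
            let r := waysM coins ((n : Int) - c).toNat acc.2
            (acc.1 + r.1, r.2)
          else (acc.1 + 0, acc.2)) ((0 : Int), memo)
      (p.1, p.2.insert (n : Int) p.1)
termination_by n
decreasing_by omega

def coin_change_repeat_alt (coins : List Int) (s : Int) : Int :=
  if s < 0 then 0 else (waysM coins s.toNat PySem.Dict.empty).1

-- ===== PRECONDITION & SPEC =====
-- Pre_ excludes negative s, where A raises IndexError, and (for s > 0) nonpositive coins, on
-- which A's value (index wraparound for c < 0, in-place doubling for c = 0) is an artefact of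
-- its forward array push while B's recursion does not terminate (s = 0 never recurses and is kept).
def Pre_coin_change_repeat (coins : List Int) (s : Int) : Prop :=
  0 ≤ s ∧ (s = 0 ∨ ∀ c ∈ coins, 1 ≤ c)
instance (coins : List Int) (s : Int) : Decidable (Pre_coin_change_repeat coins s) := by
  unfold Pre_coin_change_repeat; infer_instance

def pvWitness_coin_change_repeat : List Int × Int := ([1, 2], 4)

def Spec_coin_change_repeat (coins : List Int) (s : Int) (out : Int) : Prop :=
  out = coin_change_repeat_alt coins s
instance (coins : List Int) (s : Int) (out : Int) : Decidable (Spec_coin_change_repeat coins s out) := by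
  unfold Spec_coin_change_repeat; infer_instance

-- ===== CLAIM (what is proved, stated in full; the proofs are below) =====
def Claim_equal_coin_change_repeat : Prop := ∀ (coins : List Int) (s : Int),
  Dom_coin_change_repeat coins s → Pre_coin_change_repeat coins s →
  Spec_coin_change_repeat coins s (coin_change_repeat coins s)

-- ===== LEMMAS AND PROOFS =====

-- `waysB coins n`: the memo-free value of B's ways(n); the proofs first show that the
-- threaded memo of waysM is a cache of exactly these values.
def waysB (coins : List Int) (n : Nat) : Int :=
  if _hn : n = 0 then 1
  else coins.foldl (fun acc c =>
    acc + (if _h2 : (n : Int) - c < 0 then 0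
           else if _h3 : 1 ≤ c then waysB coins ((n : Int) - c).toNat
           else 0)) 0
termination_by n
decreasing_by omega

lemma waysB_zero (coins : List Int) : waysB coins 0 = 1 := by
  rw [waysB]
  rfl

-- the memo invariant: every stored value is the corresponding waysB value
def MemoInv (coins : List Int) (memo : PySem.Dict Int Int) : Prop :=
  ∀ (j : Nat) (v : Int), memo.get? (j : Int) = some v → v = waysB coins j

lemma MemoInv_insert (coins : List Int) (memo : PySem.Dict Int Int) (n : Nat) (v : Int)
    (h : MemoInv coins memo) (hv : v = waysB coins n) :
    MemoInv coins (memo.insert (n : Int) v) := by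
  intro j w hj
  rw [PySem.Dict.get?_insert] at hj
  by_cases hjn : (j : Int) = (n : Int)
  · rw [if_pos hjn] at hj
    have hje : j = n := by omega
    subst hje
    cases hj
    exact hv
  · rw [if_neg hjn] at hj
    exact h j w hj

lemma waysM_fold (coins : List Int) (n : Nat)
    (IH : ∀ m : Nat, m < n → ∀ memo, MemoInv coins memo →
      (waysM coins m memo).1 = waysB coins m ∧ MemoInv coins (waysM coins m memo).2) :
    ∀ (l : List Int) (a : Int) (memo : PySem.Dict Int Int), MemoInv coins memo →
    (l.foldl (fun (acc : Int × PySem.Dict Int Int) c =>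
        if _h2 : (n : Int) - c < 0 then (acc.1 + 0, acc.2)
        else if _h3 : 1 ≤ c then
          let r := waysM coins ((n : Int) - c).toNat acc.2
          (acc.1 + r.1, r.2)
        else (acc.1 + 0, acc.2)) (a, memo)).1
      = l.foldl (fun acc c =>
          acc + (if _h2 : (n : Int) - c < 0 then 0
                 else if _h3 : 1 ≤ c then waysB coins ((n : Int) - c).toNat
                 else 0)) a ∧
    MemoInv coins (l.foldl (fun (acc : Int × PySem.Dict Int Int) c =>
        if _h2 : (n : Int) - c < 0 then (acc.1 + 0, acc.2)
        else if _h3 : 1 ≤ c then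
          let r := waysM coins ((n : Int) - c).toNat acc.2
          (acc.1 + r.1, r.2)
        else (acc.1 + 0, acc.2)) (a, memo)).2 := by
  intro l
  induction l with
  | nil => intro a memo hm; exact ⟨rfl, hm⟩
  | cons c t ih =>
    intro a memo hm
    simp only [List.foldl_cons]
    by_cases h2 : (n : Int) - c < 0
    · rw [dif_pos h2, dif_pos h2]
      exact ih (a + 0) memo hm
    · by_cases h3 : 1 ≤ c
      · rw [dif_neg h2, dif_neg h2, dif_pos h3, dif_pos h3]
        have hlt : ((n : Int) - c).toNat < n := by omega
        obtain ⟨hr1, hr2⟩ := IH ((n : Int) - c).toNat hlt memo hm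
        have hz : (let r := waysM coins ((n : Int) - c).toNat memo; (a + r.1, r.2))
            = (a + (waysM coins ((n : Int) - c).toNat memo).1,
               (waysM coins ((n : Int) - c).toNat memo).2) := rfl
        rw [hz, hr1]
        exact ih _ _ hr2
      · rw [dif_neg h2, dif_neg h2, dif_neg h3, dif_neg h3]
        exact ih (a + 0) memo hm

lemma waysM_correct (coins : List Int) : ∀ (n : Nat) (memo : PySem.Dict Int Int),
    MemoInv coins memo →
    (waysM coins n memo).1 = waysB coins n ∧ MemoInv coins (waysM coins n memo).2 := by
  intro n
  induction n using Nat.strong_induction_on with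
  | _ n IH =>
    intro memo hm
    by_cases hn : n = 0
    · subst hn
      rw [waysM]
      exact ⟨waysB_zero coins ▸ rfl, hm⟩
    · have hB : waysB coins n = coins.foldl (fun acc c =>
          acc + (if _h2 : (n : Int) - c < 0 then 0
                 else if _h3 : 1 ≤ c then waysB coins ((n : Int) - c).toNat
                 else 0)) 0 := by
        rw [waysB]
        rw [dif_neg hn]
      rw [waysM, dif_neg hn]
      cases hg : memo.get? (n : Int) with
      | some v =>
        exact ⟨hm n v hg, hm⟩
      | none =>
        obtain ⟨h1, h2⟩ := waysM_fold coins n IH coins 0 memo hm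
        exact ⟨h1.trans hB.symm, MemoInv_insert coins _ n _ h2 (h1.trans hB.symm)⟩

lemma MemoInv_empty (coins : List Int) : MemoInv coins PySem.Dict.empty := by
  intro j v hj
  rw [PySem.Dict.get?_empty] at hj
  cases hj

lemma waysM_empty (coins : List Int) (n : Nat) :
    (waysM coins n PySem.Dict.empty).1 = waysB coins n :=
  (waysM_correct coins n PySem.Dict.empty (MemoInv_empty coins)).1

-- `Fc coins k j`: the value of cache[j] after the first k outer iterations of A's loop
-- (the Kronecker delta seeded at 0, plus every contribution pushed from an index j - c < k).
def Fc (coins : List Int) (k j : Nat) : Int :=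
  (if j = 0 then 1 else 0) +
  (coins.map (fun c =>
    if 0 ≤ (j : Int) - c ∧ (j : Int) - c < (k : Int) ∧ 1 ≤ c then
      waysB coins ((j : Int) - c).toNat else 0)).sum

-- `Gc coins s k q j`: cache[j] in the middle of outer iteration k, after the coin prefix q.
def Gc (coins : List Int) (s : Int) (k : Nat) (q : List Int) (j : Nat) : Int :=
  Fc coins k j +
  (q.map (fun c =>
    if (j : Int) = (k : Int) + c ∧ (k : Int) + c ≤ s then waysB coins k else 0)).sum

lemma foldl_add_eq (l : List Int) (g : Int → Int) : ∀ init : Int,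
    l.foldl (fun a c => a + g c) init = init + (l.map g).sum := by
  induction l with
  | nil => intro init; simp
  | cons c t ih => intro init; simp [List.foldl_cons, ih]; ring

lemma pyGetD_map_range (m : Nat) (f : Nat → Int) (i : Int) (h0 : 0 ≤ i) (h1 : i < (m : Int)) :
    PySem.List.pyGetD ((List.range m).map f) i 0 = f i.toNat := by
  obtain ⟨n, rfl⟩ : ∃ n : Nat, i = (n : Int) := ⟨i.toNat, by omega⟩
  have hn : n < m := by omega
  simp [PySem.List.pyGetD_natCast, List.getD_eq_getElem?_getD, hn]

lemma map_range_set (m t : Nat) (f : Nat → Int) (v : Int) (_ht : t < m) :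
    ((List.range m).map f).set t v = (List.range m).map (fun j => if j = t then v else f j) := by
  apply List.ext_getElem (by simp)
  intro i h1 h2
  simp only [List.getElem_set, List.getElem_map, List.getElem_range] at *
  rcases eq_or_ne i t with h | h
  · simp [h]
  · simp [h, Ne.symm h]

lemma waysB_eq_sum (coins : List Int) (n : Nat) (hn : n ≠ 0) :
    waysB coins n =
      (coins.map (fun c =>
        if 0 ≤ (n : Int) - c ∧ 1 ≤ c then waysB coins ((n : Int) - c).toNat else 0)).sum := by
  rw [waysB]
  rw [dif_neg hn, foldl_add_eq, zero_add]
  congr 1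
  apply List.map_congr_left
  intro c _
  split_ifs <;> first | rfl | omega

lemma Fc_zero (coins : List Int) (j : Nat) : Fc coins 0 j = if j = 0 then 1 else 0 := by
  unfold Fc
  have : (coins.map (fun c =>
      if 0 ≤ (j : Int) - c ∧ (j : Int) - c < ((0 : Nat) : Int) ∧ 1 ≤ c then
        waysB coins ((j : Int) - c).toNat else 0)) = coins.map (fun _ => 0) := by
    apply List.map_congr_left
    intro c _
    split_ifs with h
    · omega
    · rfl
  rw [this]
  simp

lemma Fc_final (coins : List Int) (hc : ∀ c ∈ coins, 1 ≤ c) (k j : Nat) (hj : j ≤ k) :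
    Fc coins k j = waysB coins j := by
  rcases eq_or_ne j 0 with h0 | h0
  · subst h0
    rw [waysB_zero]
    unfold Fc
    have : (coins.map (fun c =>
        if 0 ≤ ((0 : Nat) : Int) - c ∧ ((0 : Nat) : Int) - c < (k : Int) ∧ 1 ≤ c then
          waysB coins (((0 : Nat) : Int) - c).toNat else 0)) = coins.map (fun _ => 0) := by
      apply List.map_congr_left
      intro c _
      split_ifs with h
      · omega
      · rfl
    rw [this]
    simp
  · rw [waysB_eq_sum coins j h0]
    unfold Fc
    rw [if_neg h0, zero_add]
    congr 1
    apply List.map_congr_left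
    intro c hcm
    have h1 : 1 ≤ c := hc c hcm
    split_ifs <;> first | rfl | omega

lemma Gc_nil (coins : List Int) (s : Int) (k j : Nat) :
    Gc coins s k [] j = Fc coins k j := by simp [Gc]

lemma Gc_at_k (coins : List Int) (s : Int) (k : Nat) (q : List Int)
    (hq : ∀ c ∈ q, 1 ≤ c) : Gc coins s k q k = Fc coins k k := by
  unfold Gc
  have : (q.map (fun c =>
      if (k : Int) = (k : Int) + c ∧ (k : Int) + c ≤ s then waysB coins k else 0)) =
      q.map (fun _ => 0) := by
    apply List.map_congr_left
    intro c hcm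
    have := hq c hcm
    split_ifs with h
    · omega
    · rfl
  rw [this]
  simp

lemma Gc_append (coins : List Int) (s : Int) (k : Nat) (q : List Int) (c : Int) (j : Nat) :
    Gc coins s k (q ++ [c]) j =
      Gc coins s k q j +
        (if (j : Int) = (k : Int) + c ∧ (k : Int) + c ≤ s then waysB coins k else 0) := by
  unfold Gc
  rw [List.map_append, List.sum_append]
  simp [add_assoc]

lemma inner_loop (coins : List Int) (s : Int) (hs : 0 ≤ s) (hc : ∀ c ∈ coins, 1 ≤ c)
    (k : Nat) (_hk : (k : Int) < s) :
    ∀ (rest q : List Int), q ++ rest = coins →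
    rest.foldl (fun cache coin =>
        if (k : Int) + coin ≤ s then
          PySem.List.pySetD cache ((k : Int) + coin)
            (PySem.List.pyGetD cache ((k : Int) + coin) 0 + PySem.List.pyGetD cache (k : Int) 0)
        else cache)
      ((List.range (s + 1).toNat).map (Gc coins s k q))
    = (List.range (s + 1).toNat).map (Gc coins s k coins) := by
  intro rest
  induction rest with
  | nil =>
    intro q hq
    simp only [List.append_nil] at hq
    subst hq
    simp [List.foldl_nil]
  | cons c rest' ih =>
    intro q hq
    have hcq : ∀ x ∈ q, 1 ≤ x := fun x hx => hc x (hq ▸ List.mem_append_left _ hx)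
    have hc1 : 1 ≤ c := hc c (hq ▸ List.mem_append_right _ (List.mem_cons_self ..))
    have hq' : (q ++ [c]) ++ rest' = coins := by simpa [List.append_assoc] using hq
    rw [List.foldl_cons]
    rcases le_or_gt ((k : Int) + c) s with hle | hgt
    · rw [if_pos hle]
      have ht0 : 0 ≤ (k : Int) + c := by omega
      have htm : (k : Int) + c < ((s + 1).toNat : Int) := by omega
      have hkm : (k : Int) < ((s + 1).toNat : Int) := by omega
      rw [pyGetD_map_range _ _ _ ht0 htm, pyGetD_map_range _ _ _ (by omega) hkm]
      have hkt : ((k : Int)).toNat = k := by omega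
      rw [PySem.List.pySetD_of_nonneg _ _ ht0,
          map_range_set _ _ _ _ (by omega)]
      have hstate : ((List.range (s + 1).toNat).map
          (fun j => if j = ((k : Int) + c).toNat then
            Gc coins s k q ((k : Int) + c).toNat + Gc coins s k q ((k : Int)).toNat
          else Gc coins s k q j))
          = (List.range (s + 1).toNat).map (Gc coins s k (q ++ [c])) := by
        apply List.map_congr_left
        intro j hj
        have hjm : j < (s + 1).toNat := List.mem_range.mp hj
        rw [Gc_append]
        rcases eq_or_ne j ((k : Int) + c).toNat with h | h
        · have hcond : (j : Int) = (k : Int) + c ∧ (k : Int) + c ≤ s := ⟨by omega, hle⟩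
          rw [if_pos h, if_pos hcond]
          rw [hkt, Gc_at_k coins s k q hcq, Fc_final coins hc k k le_rfl]
          rw [h]
        · have hncond : ¬((j : Int) = (k : Int) + c ∧ (k : Int) + c ≤ s) := by omega
          rw [if_neg h, if_neg hncond]
          simp
      rw [hstate]
      exact ih (q ++ [c]) hq'
    · rw [if_neg (by omega)]
      have hstate : (List.range (s + 1).toNat).map (Gc coins s k q)
          = (List.range (s + 1).toNat).map (Gc coins s k (q ++ [c])) := by
        apply List.map_congr_left
        intro j _
        have hncond : ¬((j : Int) = (k : Int) + c ∧ (k : Int) + c ≤ s) := by omega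
        rw [Gc_append, if_neg hncond]
        simp
      rw [hstate]
      exact ih (q ++ [c]) hq'

lemma Gc_full (coins : List Int) (s : Int) (hc : ∀ c ∈ coins, 1 ≤ c)
    (k j : Nat) (hj : (j : Int) ≤ s) :
    Gc coins s k coins j = Fc coins (k + 1) j := by
  unfold Gc Fc
  rw [add_assoc]
  congr 1
  rw [← List.sum_map_add]  -- may need the right name
  congr 1
  apply List.map_congr_left
  intro c hcm
  have h1 : 1 ≤ c := hc c hcm
  by_cases he : (j : Int) - c = (k : Int)
  · have ht : ((j : Int) - c).toNat = k := by omega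
    have hcond1 : 0 ≤ (j : Int) - c ∧ (j : Int) - c < ((k + 1 : Nat) : Int) ∧ 1 ≤ c :=
      ⟨by omega, by push_cast; omega, h1⟩
    have hcond2 : ¬(0 ≤ (j : Int) - c ∧ (j : Int) - c < (k : Int) ∧ 1 ≤ c) := by omega
    have hcond3 : (j : Int) = (k : Int) + c ∧ (k : Int) + c ≤ s := ⟨by omega, by omega⟩
    rw [if_pos hcond1, if_neg hcond2, if_pos hcond3, ht]
    ring
  · have hcond3 : ¬((j : Int) = (k : Int) + c ∧ (k : Int) + c ≤ s) := by omega
    rw [if_neg hcond3, add_zero]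
    have hiff : (0 ≤ (j : Int) - c ∧ (j : Int) - c < (k : Int) ∧ 1 ≤ c) ↔
        (0 ≤ (j : Int) - c ∧ (j : Int) - c < ((k + 1 : Nat) : Int) ∧ 1 ≤ c) := by
      push_cast
      omega
    rw [if_congr hiff rfl rfl]

lemma outer_loop (coins : List Int) (s : Int) (hs : 0 ≤ s) (hc : ∀ c ∈ coins, 1 ≤ c) :
    ∀ n : Nat, (n : Int) ≤ s →
    (List.range n).foldl (fun cache (k : Nat) =>
        coins.foldl (fun cache coin =>
          if (k : Int) + coin ≤ s then
            PySem.List.pySetD cache ((k : Int) + coin)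
              (PySem.List.pyGetD cache ((k : Int) + coin) 0 +
                PySem.List.pyGetD cache (k : Int) 0)
          else cache) cache)
      ((List.range (s + 1).toNat).map (Fc coins 0))
    = (List.range (s + 1).toNat).map (Fc coins n) := by
  intro n
  induction n with
  | zero => intro _; simp
  | succ n ih =>
    intro hn
    rw [List.range_succ, List.foldl_append, ih (by omega), List.foldl_cons, List.foldl_nil]
    have hGnil : (List.range (s + 1).toNat).map (Fc coins n)
        = (List.range (s + 1).toNat).map (Gc coins s n []) := by
      apply List.map_congr_left
      intro j _
      rw [Gc_nil]
    rw [hGnil, inner_loop coins s hs hc n (by omega) coins [] rfl]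
    apply List.map_congr_left
    intro j hj
    have hjm : j < (s + 1).toNat := List.mem_range.mp hj
    exact Gc_full coins s hc n j (by omega)

-- ===== VERDICT (by name: the statement is the Claim_ definition above) =====
theorem coin_change_repeat_spec : Claim_equal_coin_change_repeat := by
  intro coins s _ hpre
  obtain ⟨hs, hzc⟩ := hpre
  rcases hzc with rfl | hc
  · -- s = 0: the outer loop body never runs and B's recursion returns 1 immediately
    unfold Spec_coin_change_repeat coin_change_repeat coin_change_repeat_alt
    rw [if_neg (by omega)]
    show PySem.List.pyGetD ((PySem.List.pyRange 0 0 1).foldl (fun cache i =>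
        coins.foldl (fun cache coin =>
          if i + coin ≤ 0 then
            PySem.List.pySetD cache (i + coin)
              (PySem.List.pyGetD cache (i + coin) 0 + PySem.List.pyGetD cache i 0)
          else cache) cache)
        (PySem.List.pySetD ((PySem.List.pyRange 0 (0 + 1) 1).map (fun _ => (0 : Int))) 0 1)) 0 0
      = (waysM coins (0 : Int).toNat PySem.Dict.empty).1
    have h0 : PySem.List.pyRange 0 0 1 = [] := by decide
    have h1 : PySem.List.pyRange 0 (0 + 1) 1 = [0] := by decide
    rw [h0, h1, List.foldl_nil, show ((0 : Int).toNat) = 0 from rfl, waysM_empty, waysB_zero]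
    decide
  unfold Spec_coin_change_repeat coin_change_repeat_alt
  rw [if_neg (by omega)]
  show PySem.List.pyGetD ((PySem.List.pyRange 0 s 1).foldl (fun cache i =>
      coins.foldl (fun cache coin =>
        if i + coin ≤ s then
          PySem.List.pySetD cache (i + coin)
            (PySem.List.pyGetD cache (i + coin) 0 + PySem.List.pyGetD cache i 0)
        else cache) cache)
      (PySem.List.pySetD ((PySem.List.pyRange 0 (s + 1) 1).map (fun _ => (0 : Int))) 0 1)) s 0
    = (waysM coins s.toNat PySem.Dict.empty).1
  rw [waysM_empty]
  have hinit : PySem.List.pySetD ((PySem.List.pyRange 0 (s + 1) 1).map (fun _ => (0 : Int))) 0 1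
      = (List.range (s + 1).toNat).map (Fc coins 0) := by
    rw [PySem.List.pyRange_one, List.map_map]
    rw [PySem.List.pySetD_of_nonneg _ _ (le_refl (0 : Int))]
    have hm : (0 : Int).toNat = 0 := rfl
    have hsz : (s + 1 - 0).toNat = (s + 1).toNat := by omega
    rw [hm, hsz, map_range_set _ _ _ _ (by omega)]
    apply List.map_congr_left
    intro j _
    rw [Fc_zero]
    rcases eq_or_ne j 0 with h | h <;> simp [h]
  rw [hinit]
  have houter : (PySem.List.pyRange 0 s 1).foldl (fun cache i =>
      coins.foldl (fun cache coin =>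
        if i + coin ≤ s then
          PySem.List.pySetD cache (i + coin)
            (PySem.List.pyGetD cache (i + coin) 0 + PySem.List.pyGetD cache i 0)
        else cache) cache) ((List.range (s + 1).toNat).map (Fc coins 0))
      = (List.range (s + 1).toNat).map (Fc coins s.toNat) := by
    rw [PySem.List.pyRange_one, List.foldl_map]
    have hzero : (s - 0).toNat = s.toNat := by omega
    rw [hzero]
    have hbody : (fun (cache : List Int) (k : Nat) =>
        coins.foldl (fun cache coin =>
          if (0 : Int) + (k : Int) + coin ≤ s then
            PySem.List.pySetD cache ((0 : Int) + (k : Int) + coin)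
              (PySem.List.pyGetD cache ((0 : Int) + (k : Int) + coin) 0 +
                PySem.List.pyGetD cache ((0 : Int) + (k : Int)) 0)
          else cache) cache)
        = (fun (cache : List Int) (k : Nat) =>
        coins.foldl (fun cache coin =>
          if (k : Int) + coin ≤ s then
            PySem.List.pySetD cache ((k : Int) + coin)
              (PySem.List.pyGetD cache ((k : Int) + coin) 0 +
                PySem.List.pyGetD cache (k : Int) 0)
          else cache) cache) := by
      funext cache k
      simp
    rw [hbody]
    exact outer_loop coins s hs hc s.toNat (by omega)
  rw [houter]
  rw [pyGetD_map_range _ _ _ hs (by omega)]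
  exact Fc_final coins hc s.toNat s.toNat le_rfl
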